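-- pv_equiv track=rewrite | github.com/qiaolunzhang/progressive-recovery | legacy/prog.py | non_neg
-- ===== SOURCE A (Python) =====
-- def non_neg(recovery_costs, config):
--     iteration = recovery_costs
--     alloc_resources = [iteration[i] - config[i] for i in range(len(config))]
--
--     # check for the special case where the resources don't divide the sum of the costs
--     # in this case, at the final step there will be a single non-negative value (rest will be zero)
--     negative = 0
--     zeros = 0
--
--     for e in alloc_resources:
--         if e < 0:
--             negative += 1
--             # return false since we shouldn't over-allocate
--         if e == 0:
--             zeros += 1
--
--     # if all our resource costs are <= 0, this is the last config in a config sequence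
--     if negative + zeros == len(alloc_resources):
--         return True
--
--     # otherwise we prune this config
--     if negative > 0:
--         return False
--
--     return True
-- ===== SOURCE B (Python) =====
-- def non_neg(recovery_costs, config):
--     diffs = sorted(recovery_costs[i] - config[i] for i in range(len(config)))
--     if not diffs:
--         return True
--     return diffs[0] >= 0 or diffs[-1] <= 0
-- ===== Notes on version B (the rewrite author's own statement) =====
-- stated objective: alternative
-- what changed: B sorts the element-wise differences and decides from the two endpoints (min >= 0 or max <= 0) instead of A's single counting pass with negative/zero counters and a count-equals-length test.
import Mathlib
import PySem

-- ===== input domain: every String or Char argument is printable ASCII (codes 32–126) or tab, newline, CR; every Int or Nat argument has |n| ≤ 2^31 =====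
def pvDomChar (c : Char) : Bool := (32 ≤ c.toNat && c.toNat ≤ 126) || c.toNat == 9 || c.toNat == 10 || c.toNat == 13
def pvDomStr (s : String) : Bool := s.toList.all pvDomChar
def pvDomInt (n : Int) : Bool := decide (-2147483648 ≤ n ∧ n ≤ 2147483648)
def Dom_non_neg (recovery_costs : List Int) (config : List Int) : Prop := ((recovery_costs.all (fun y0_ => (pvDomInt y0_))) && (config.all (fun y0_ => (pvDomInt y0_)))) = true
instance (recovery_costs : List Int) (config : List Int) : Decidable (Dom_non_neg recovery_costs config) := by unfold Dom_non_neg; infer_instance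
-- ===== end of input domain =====

-- B sorts the differences and decides from the endpoints (min/max) instead of A's
-- counting pass with negative/zero counters; return value equivalence only.

-- ===== PORT A =====
-- counting loop: (negative, zeros) accumulated over alloc_resources, in order
def nonNegCounts : List Int → Nat × Nat → Nat × Nat
  | [], acc => acc
  | e :: rest, (neg, zer) =>
      nonNegCounts rest ((if e < 0 then neg + 1 else neg), (if e = 0 then zer + 1 else zer))

def non_neg (recovery_costs : List Int) (config : List Int) : Bool :=
  -- alloc_resources = [recovery_costs[i] - config[i] for i in range(len(config))];
  -- indices are in range under Pre_non_neg, so .getD 0 is never the raising case there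
  let alloc := (List.range config.length).map
    (fun i => (PySem.List.pyGet? recovery_costs (i : Int)).getD 0 - (PySem.List.pyGet? config (i : Int)).getD 0)
  let c := nonNegCounts alloc (0, 0)
  if c.1 + c.2 = alloc.length then true
  else if c.1 > 0 then false
  else true

-- ===== PORT B =====
def non_neg_alt (recovery_costs : List Int) (config : List Int) : Bool :=
  let diffs := PySem.List.sorted ((List.range config.length).map
    (fun i => (PySem.List.pyGet? recovery_costs (i : Int)).getD 0 - (PySem.List.pyGet? config (i : Int)).getD 0))
    (fun x => x) false
  if diffs = [] then true
  else decide (0 ≤ PySem.List.pyGetD diffs 0 0) || decide (PySem.List.pyGetD diffs (-1) 0 ≤ 0)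

-- ===== PRECONDITION & SPEC =====
-- Pre_ excludes exactly the inputs where Python A raises IndexError: config longer than recovery_costs.
def Pre_non_neg (recovery_costs : List Int) (config : List Int) : Prop :=
  config.length ≤ recovery_costs.length
instance (recovery_costs : List Int) (config : List Int) : Decidable (Pre_non_neg recovery_costs config) := by unfold Pre_non_neg; infer_instance

def pvWitness_non_neg : List Int × List Int := ([3, -1, 2], [1, 0, 2])

def Spec_non_neg (recovery_costs : List Int) (config : List Int) (out : Bool) : Prop := out = non_neg_alt recovery_costs config
instance (recovery_costs : List Int) (config : List Int) (out : Bool) : Decidable (Spec_non_neg recovery_costs config out) := by unfold Spec_non_neg; infer_instance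

-- ===== CLAIM =====
def Claim_equal_non_neg : Prop := ∀ (recovery_costs : List Int) (config : List Int), Dom_non_neg recovery_costs config → Pre_non_neg recovery_costs config → Spec_non_neg recovery_costs config (non_neg recovery_costs config)

-- ===== LEMMAS AND PROOFS =====
theorem nonNegCounts_eq (l : List Int) (n z : Nat) :
    nonNegCounts l (n, z) =
      (n + l.countP (fun e => decide (e < 0)), z + l.countP (fun e => decide (e = 0))) := by
  induction l generalizing n z with
  | nil => simp [nonNegCounts]
  | cons e rest ih =>
      simp only [nonNegCounts, ih, List.countP_cons]
      refine Prod.ext ?_ ?_ <;> simp only [] <;> split_ifs <;> simp_all <;> omega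

theorem countP_split (l : List Int) :
    l.countP (fun e => decide (e < 0)) + l.countP (fun e => decide (e = 0)) =
      l.countP (fun e => decide (e ≤ 0)) := by
  induction l with
  | nil => simp
  | cons e rest ih => simp only [List.countP_cons]; split_ifs <;> simp_all <;> omega

-- A's counting decision, characterised: true unless some diff < 0 and some diff > 0
theorem a_char (l : List Int) :
    (let c := nonNegCounts l (0, 0);
     if c.1 + c.2 = l.length then true else if c.1 > 0 then false else true) = true
    ↔ ¬ ((∃ d ∈ l, d < 0) ∧ (∃ d ∈ l, 0 < d)) := by
  simp only [nonNegCounts_eq, Nat.zero_add]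
  by_cases hpos : ∃ d ∈ l, 0 < d
  · by_cases hneg : ∃ d ∈ l, d < 0
    · have h1 : l.countP (fun e => decide (e < 0)) + l.countP (fun e => decide (e = 0)) ≠ l.length := by
        rw [countP_split]
        intro h
        obtain ⟨d, hd, hd0⟩ := hpos
        have := (List.countP_eq_length (p := fun e => decide (e ≤ 0))).mp h d hd
        simp at this; omega
      have h2 : 0 < l.countP (fun e => decide (e < 0)) := by
        obtain ⟨d, hd, hd0⟩ := hneg
        exact List.countP_pos_iff.mpr ⟨d, hd, by simpa⟩
      simp only [h1, if_false]
      simp only [gt_iff_lt, h2, if_true, Bool.false_eq_true, false_iff, not_not]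
      exact ⟨hneg, hpos⟩
    · have h2 : l.countP (fun e => decide (e < 0)) = 0 := by
        rw [List.countP_eq_zero]; intro d hd; push Not at hneg; simpa using (hneg d hd)
      simp only [h2]
      split_ifs with h <;> simp_all
  · have h1 : l.countP (fun e => decide (e < 0)) + l.countP (fun e => decide (e = 0)) = l.length := by
      rw [countP_split, List.countP_eq_length]
      intro d hd; push Not at hpos; simpa using hpos d hd
    simp [h1, hpos]

-- B's sorted-endpoint decision, same characterisation
theorem b_char (l : List Int) :
    (let s := PySem.List.sorted l (fun x => x) false;
     if s = [] then true
     else decide (0 ≤ PySem.List.pyGetD s 0 0) || decide (PySem.List.pyGetD s (-1) 0 ≤ 0)) = true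
    ↔ ¬ ((∃ d ∈ l, d < 0) ∧ (∃ d ∈ l, 0 < d)) := by
  by_cases hl : l = []
  · subst hl; simp [PySem.List.sorted]
  · have hne : PySem.List.sorted l (fun x : Int => x) false ≠ [] := by
      simpa [PySem.List.sorted_eq_nil_iff] using hl
    obtain ⟨m, t, hmt⟩ := List.exists_cons_of_ne_nil hne
    have hmin : ∀ y ∈ l, m ≤ y := PySem.List.key_head_sorted_le l (fun x => x) hmt
    have hmax : ∀ y ∈ l, y ≤ (m :: t).getLast (List.cons_ne_nil m t) := by
      intro y hy
      obtain ⟨p, hp, hpe⟩ := List.mem_iff_getElem.mp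
        ((PySem.List.mem_sorted l (fun x => x) false y).mpr hy)
      have hlen : 0 < (PySem.List.sorted l (fun x : Int => x) false).length :=
        List.length_pos_of_ne_nil hne
      have hmono := PySem.List.sorted_id_getElem_mono l
        (p := p) (q := (PySem.List.sorted l (fun x : Int => x) false).length - 1)
        (by omega) (by omega)
      rw [hpe] at hmono
      have hcast : (m :: t).getLast (List.cons_ne_nil m t)
          = (PySem.List.sorted l (fun x : Int => x) false)[(PySem.List.sorted l (fun x : Int => x) false).length - 1] := by
        simp [← hmt, List.getLast_eq_getElem]
      rw [hcast]; exact hmono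
    have hm_mem : m ∈ l := (PySem.List.mem_sorted l (fun x => x) false m).mp
      (hmt ▸ List.mem_cons_self)
    have hlast_mem : (m :: t).getLast (List.cons_ne_nil m t) ∈ l := by
      refine (PySem.List.mem_sorted l (fun x => x) false _).mp ?_
      rw [hmt]; exact List.getLast_mem _
    simp only [hmt, List.cons_ne_nil, if_false, PySem.List.pyGetD_zero_cons,
      PySem.List.pyGetD_neg_one (m :: t) 0 (List.cons_ne_nil m t),
      Bool.or_eq_true, decide_eq_true_eq]
    constructor
    · rintro h ⟨⟨dn, hdn, hdn0⟩, ⟨dp, hdp, hdp0⟩⟩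
      rcases h with h | h
      · exact absurd (le_trans h (hmin dn hdn)) (by omega)
      · exact absurd (le_trans (hmax dp hdp) h) (by omega)
    · intro h
      by_contra hc
      push Not at hc
      exact h ⟨⟨m, hm_mem, hc.1⟩, ⟨_, hlast_mem, hc.2⟩⟩

-- ===== VERDICT =====
theorem non_neg_spec : Claim_equal_non_neg := by
  intro rc cf _ _
  unfold Spec_non_neg non_neg non_neg_alt
  rw [Bool.eq_iff_iff]
  exact Iff.trans (a_char _) (b_char _).symm
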